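-- pv_equiv track=rewrite | github.com/dustbyte/aoc | 2021/day13/main.py | find_maxes
-- ===== SOURCE A (Python) =====
-- def find_maxes(dots):
--     x = 0
--     y = 0
--
--     for dot in dots:
--         if dot[0] > x:
--             x = dot[0]
--         if dot[1] > y:
--             y = dot[1]
--
--     return x, y
-- ===== SOURCE B (Python) =====
-- def find_maxes(dots):
--     xs = sorted([0] + [d[0] for d in dots])
--     ys = sorted([0] + [d[1] for d in dots])
--     return xs[-1], ys[-1]
-- ===== Notes on version B (the rewrite author's own statement) =====
-- stated objective: alternative
-- what changed: Replaces the running-max loop with sort-then-pick: each coordinate projection (with the 0 floor prepended) is sorted and the last element of the sorted list is returned.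
import Mathlib
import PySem

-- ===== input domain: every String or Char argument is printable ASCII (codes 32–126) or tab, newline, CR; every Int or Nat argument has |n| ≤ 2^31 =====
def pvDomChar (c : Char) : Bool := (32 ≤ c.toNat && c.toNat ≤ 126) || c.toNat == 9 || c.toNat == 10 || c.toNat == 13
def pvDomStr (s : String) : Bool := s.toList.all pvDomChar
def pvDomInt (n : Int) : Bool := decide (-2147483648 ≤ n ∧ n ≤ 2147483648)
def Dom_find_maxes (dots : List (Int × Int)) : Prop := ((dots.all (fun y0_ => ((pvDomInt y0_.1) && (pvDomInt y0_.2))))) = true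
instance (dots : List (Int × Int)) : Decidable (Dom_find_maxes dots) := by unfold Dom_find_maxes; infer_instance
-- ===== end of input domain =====

-- ===== PORT A =====
-- B replaces the single running-max loop by sort-then-pick-last on each 0-prefixed coordinate projection (alternative algorithm).
def find_maxes (dots : List (Int × Int)) : Int × Int :=
  dots.foldl (fun (st : Int × Int) dot =>
    let x := if dot.1 > st.1 then dot.1 else st.1
    let y := if dot.2 > st.2 then dot.2 else st.2
    (x, y)) (0, 0)

-- ===== PORT B =====
def find_maxes_alt (dots : List (Int × Int)) : Int × Int :=
  -- xs = sorted([0] + [d[0] for d in dots]); ys likewise; return xs[-1], ys[-1]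
  let xs := PySem.List.sorted (0 :: dots.map Prod.fst) (fun x => x) false
  let ys := PySem.List.sorted (0 :: dots.map Prod.snd) (fun x => x) false
  (PySem.List.pyGetD xs (-1) 0, PySem.List.pyGetD ys (-1) 0)  -- xs[-1]: always in range (the lists are nonempty)

-- ===== PRECONDITION & SPEC =====
def Spec_find_maxes (dots : List (Int × Int)) (out : Int × Int) : Prop := out = find_maxes_alt dots
instance (dots : List (Int × Int)) (out : Int × Int) : Decidable (Spec_find_maxes dots out) := by unfold Spec_find_maxes; infer_instance

-- ===== CLAIM (what is proved, stated in full; the proofs are below) =====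
def Claim_equal_find_maxes : Prop := ∀ (dots : List (Int × Int)), Dom_find_maxes dots → Spec_find_maxes dots (find_maxes dots)

-- ===== LEMMAS AND PROOFS =====

-- A's loop computes the pair of running maxima of the two projections.
lemma find_maxes_fold (dots : List (Int × Int)) (x y : Int) :
    dots.foldl (fun (st : Int × Int) dot =>
      let x := if dot.1 > st.1 then dot.1 else st.1
      let y := if dot.2 > st.2 then dot.2 else st.2
      (x, y)) (x, y)
    = ((dots.map Prod.fst).foldl max x, (dots.map Prod.snd).foldl max y) := by
  induction dots generalizing x y with
  | nil => rfl
  | cons d t ih =>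
      simp only [List.foldl, List.map]
      rw [ih]
      congr 1 <;> congr 1 <;> simp [max_def] <;> omega

-- The last element of a ≤-pairwise list bounds every element.
lemma pairwise_le_getLast (l : List Int) (h : l.Pairwise (· ≤ ·)) (hne : l ≠ []) :
    ∀ x ∈ l, x ≤ l.getLast hne := by
  intro x hx
  obtain ⟨i, hi, rfl⟩ := List.mem_iff_getElem.mp hx
  rw [List.getLast_eq_getElem]
  by_cases hij : i = l.length - 1
  · subst hij; exact le_refl _
  · exact (List.pairwise_iff_getElem.mp h) i (l.length - 1) hi
      (by omega) (by omega)

-- sorted([a]+l)[-1] is the running max foldl max a l.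
lemma last_sorted_eq_foldl_max (a : Int) (l : List Int) :
    PySem.List.pyGetD (PySem.List.sorted (a :: l) (fun x => x) false) (-1) 0
      = l.foldl max a := by
  set s := PySem.List.sorted (a :: l) (fun x => x) false with hs
  have hperm : s.Perm (a :: l) := PySem.List.sorted_perm _ _ _
  have hne : s ≠ [] := by
    intro h0
    have := hperm.length_eq
    simp [h0] at this
  rw [PySem.List.pyGetD_neg_one _ _ hne]
  have hpw : s.Pairwise (fun p q => (fun x => x) p ≤ (fun x => x) q) :=
    PySem.List.sorted_pairwise _ _
  have hbound := pairwise_le_getLast s hpw hne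
  have hmax := PySem.List.le_foldl_max l a
  -- getLast ≤ foldl max
  have h1 : s.getLast hne ≤ l.foldl max a := by
    have hmem : s.getLast hne ∈ a :: l := hperm.mem_iff.mp (List.getLast_mem hne)
    rcases List.mem_cons.mp hmem with h | h
    · rw [h]; exact hmax.1
    · exact hmax.2 _ h
  -- foldl max ≤ getLast
  have h2 : l.foldl max a ≤ s.getLast hne := by
    have hmem : l.foldl max a ∈ s := by
      rcases PySem.List.foldl_max_mem l a with h | h
      · exact hperm.mem_iff.mpr (by simp [h])
      · exact hperm.mem_iff.mpr (by simp [h])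
    exact hbound _ hmem
  omega

-- ===== VERDICT (by name: the statement is the Claim_ definition above) =====
theorem find_maxes_spec : Claim_equal_find_maxes := by
  intro dots _
  unfold Spec_find_maxes find_maxes find_maxes_alt
  simp only []
  rw [find_maxes_fold, last_sorted_eq_foldl_max, last_sorted_eq_foldl_max]
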